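-- pv_equiv track=rewrite | github.com/CarlosElizarraras/Pr-ctica-2_APR | main.py | generarMatrizInicial
-- ===== SOURCE A (Python) =====
-- def generarMatrizInicial(matriz,filas,columnas):
--
--     for i in range(len(matriz)):  # ALTO
--         for j in range(len(matriz[0])):  # LARGO
--             if i == 0:
--                 if j == 0:
--                     matriz[i][j]=" "
--                 else:
--                     matriz[i][j] = columnas[j-1]
--             else:
--                 if j == 0:
--                     matriz[i][j]=filas[i-1]
--                 else:
--                     matriz[i][j]="-"
--     return matriz
-- ===== SOURCE B (Python) =====
-- def generarMatrizInicial(matriz, filas, columnas):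
--     if not matriz or not matriz[0]:
--         return matriz
--     w = len(matriz[0])
--     for fila in matriz:
--         fila[:w] = ["-"] * w
--     matriz[0][0] = " "
--     matriz[0][1:w] = columnas[:w - 1]
--     for fila, nombre in zip(matriz[1:], filas):
--         fila[0] = nombre
--     return matriz
-- ===== Notes on version B (the rewrite author's own statement) =====
-- stated objective: simpler
-- what changed: Replaced the per-cell i/j if-else grid walk by a bulk dash fill of every row followed by two edge stamps: a slice-assigned header row and a zip loop writing the first column.
import Mathlib
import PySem

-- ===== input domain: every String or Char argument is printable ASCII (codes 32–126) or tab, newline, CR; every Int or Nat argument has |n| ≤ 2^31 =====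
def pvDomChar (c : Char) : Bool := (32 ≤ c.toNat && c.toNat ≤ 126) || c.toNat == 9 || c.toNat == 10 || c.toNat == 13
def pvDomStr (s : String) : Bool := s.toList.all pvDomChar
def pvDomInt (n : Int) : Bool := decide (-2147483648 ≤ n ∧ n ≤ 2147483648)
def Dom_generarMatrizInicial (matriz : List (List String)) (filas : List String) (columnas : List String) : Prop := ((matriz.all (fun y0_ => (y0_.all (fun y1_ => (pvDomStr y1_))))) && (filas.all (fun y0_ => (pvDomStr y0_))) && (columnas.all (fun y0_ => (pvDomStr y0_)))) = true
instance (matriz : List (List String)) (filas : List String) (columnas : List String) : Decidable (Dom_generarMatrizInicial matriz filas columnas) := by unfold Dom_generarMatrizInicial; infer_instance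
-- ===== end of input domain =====

-- B replaces A's per-cell if/else grid walk with a bulk dash fill plus two edge stamps
-- (header-row slice assignment and a first-column zip loop): simpler decomposition, same cost.
-- Both Pythons mutate `matriz` in place and return it; the theorems are about the return value.

-- ===== PORT A =====
-- matriz[i][j] = v  (in-range assignment; out-of-range raises in Python and is excluded by Pre_)
def pvSetCell (m : List (List String)) (i j : Nat) (v : String) : List (List String) :=
  m.set i ((m.getD i []).set j v)

-- the if/else tree choosing the value written at cell (i, j)
def pvValA (filas columnas : List String) (i j : Nat) : String :=
  if i = 0 then (if j = 0 then " " else columnas.getD (j - 1) "")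
  else (if j = 0 then filas.getD (i - 1) "" else "-")

def generarMatrizInicial (matriz : List (List String)) (filas : List String) (columnas : List String) : List (List String) :=
  (List.range matriz.length).foldl (fun m i =>
    (List.range (m.getD 0 []).length).foldl (fun m' j =>
      pvSetCell m' i j (pvValA filas columnas i j)) m) matriz

-- ===== PORT B =====
-- the zip loop: fila[0] = nombre for (fila, nombre) in zip(matriz[1:], filas)
def pvStampCol : List (List String) → List String → List (List String)
  | rows, [] => rows
  | [], _ => []
  | r :: rs, f :: fs => (r.set 0 f) :: pvStampCol rs fs

def generarMatrizInicial_alt (matriz : List (List String)) (filas : List String) (columnas : List String) : List (List String) :=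
  if matriz = [] ∨ matriz.headD [] = [] then matriz
  else
    let w := (matriz.headD []).length
    -- fila[:w] = ["-"] * w  for each row
    let m1 := matriz.map (fun fila => List.replicate w "-" ++ fila.drop w)
    -- matriz[0][0] = " "
    let r0 := (m1.headD []).set 0 " "
    -- matriz[0][1:w] = columnas[:w-1]
    let r0' := r0.take 1 ++ columnas.take (w - 1) ++ r0.drop w
    let m2 := m1.set 0 r0'
    match m2 with
    | [] => []
    | r :: rs => r :: pvStampCol rs filas

-- ===== PRECONDITION & SPEC =====
-- Pre_ excludes exactly the inputs on which A raises IndexError: a row shorter than row 0,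
-- or columnas/filas too short for the header/first-column writes (A writes cells j < len(matriz[0])).
def Pre_generarMatrizInicial (matriz : List (List String)) (filas : List String) (columnas : List String) : Prop :=
  matriz = [] ∨ (matriz.headD []).length = 0 ∨
  ((∀ row ∈ matriz, (matriz.headD []).length ≤ row.length) ∧
   (matriz.headD []).length - 1 ≤ columnas.length ∧
   matriz.length - 1 ≤ filas.length)

instance (matriz : List (List String)) (filas : List String) (columnas : List String) : Decidable (Pre_generarMatrizInicial matriz filas columnas) := by unfold Pre_generarMatrizInicial; infer_instance

def pvWitness_generarMatrizInicial : List (List String) × List String × List String :=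
  ([["a", "b"], ["c", "d"]], ["F1"], ["C1"])

def Spec_generarMatrizInicial (matriz : List (List String)) (filas : List String) (columnas : List String) (out : List (List String)) : Prop := out = generarMatrizInicial_alt matriz filas columnas
instance (matriz : List (List String)) (filas : List String) (columnas : List String) (out : List (List String)) : Decidable (Spec_generarMatrizInicial matriz filas columnas out) := by unfold Spec_generarMatrizInicial; infer_instance

-- ===== CLAIM (what is proved, stated in full; the proofs are below) =====
def Claim_equal_generarMatrizInicial : Prop := ∀ (matriz : List (List String)) (filas : List String) (columnas : List String), Dom_generarMatrizInicial matriz filas columnas → Pre_generarMatrizInicial matriz filas columnas → Spec_generarMatrizInicial matriz filas columnas (generarMatrizInicial matriz filas columnas)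

-- ===== LEMMAS AND PROOFS =====

-- the common target row: what row i looks like in the result
def pvTRow (filas columnas : List String) (w : Nat) (i : Nat) (row : List String) : List String :=
  if i = 0 then " " :: (columnas.take (w - 1) ++ row.drop w)
  else filas.getD (i - 1) "" :: (List.replicate (w - 1) "-" ++ row.drop w)

-- rows with index < n already rewritten
def pvPartial (filas columnas : List String) (w n : Nat) (matriz : List (List String)) : List (List String) :=
  matriz.mapIdx (fun i row => if i < n then pvTRow filas columnas w i row else row)

-- (1) setting cells 0..w-1 of a row
theorem pv_row_fill (val : Nat → String) :
    ∀ (w : Nat) (r : List String), w ≤ r.length →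
    (List.range w).foldl (fun r j => r.set j (val j)) r = (List.range w).map val ++ r.drop w := by
  intro w
  induction w with
  | zero => intro r _; simp
  | succ w ih =>
    intro r hw
    have hw' : w ≤ r.length := by omega
    have hlt : w < r.length := by omega
    rw [List.range_succ, List.foldl_append, List.map_append, ih r hw']
    simp only [List.foldl_cons, List.foldl_nil]
    rw [List.set_append]
    have hlen : ((List.range w).map val).length = w := by simp
    rw [hlen]
    simp only [Nat.lt_irrefl, if_false, Nat.sub_self]
    have hset : (List.drop w r).set 0 (val w) = val w :: List.drop (w + 1) r := by
      rw [List.drop_eq_getElem_cons hlt, List.set_cons_zero]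
    rw [hset]
    simp [List.append_assoc]

-- (2) lifting the inner fold over pvSetCell to a single row update
theorem pv_inner_lift (val : Nat → String) :
    ∀ (l : List Nat) (m : List (List String)) (i : Nat) (hi : i < m.length),
    l.foldl (fun m j => pvSetCell m i j (val j)) m
      = m.set i (l.foldl (fun r j => r.set j (val j)) m[i]) := by
  intro l
  induction l with
  | nil => intro m i hi; simp
  | cons j l ih =>
    intro m i hi
    simp only [List.foldl_cons]
    have hgd : m.getD i [] = m[i] := List.getD_eq_getElem m [] hi
    have hlen : i < (pvSetCell m i j (val j)).length := by simp [pvSetCell, hi]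
    rw [ih _ i hlen]
    have : (pvSetCell m i j (val j))[i] = m[i].set j (val j) := by
      simp [pvSetCell, List.getElem_set_self, List.getElem?_eq_getElem hi]
    rw [this]
    simp [pvSetCell, List.set_set]

-- (3) the written prefix for row 0
theorem pv_prefix_zero (filas columnas : List String) (w : Nat) (hw : 1 ≤ w)
    (hc : w - 1 ≤ columnas.length) :
    (List.range w).map (pvValA filas columnas 0) = " " :: columnas.take (w - 1) := by
  apply List.ext_getElem
  · simp; omega
  · intro k h1 h2
    simp only [List.getElem_map, List.getElem_range]
    match k with
    | 0 => simp [pvValA]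
    | k + 1 =>
      have hk : k < columnas.length := by simp at h2; omega
      simp [pvValA, List.getElem_take, List.getElem?_eq_getElem hk]

-- (4) the written prefix for row i+1
theorem pv_prefix_succ (filas columnas : List String) (w i : Nat) (hw : 1 ≤ w) :
    (List.range w).map (pvValA filas columnas (i + 1))
      = filas.getD i "" :: List.replicate (w - 1) "-" := by
  apply List.ext_getElem
  · simp; omega
  · intro k h1 h2
    simp only [List.getElem_map, List.getElem_range]
    match k with
    | 0 => simp [pvValA]
    | k + 1 => simp [pvValA]

-- target row for the processed prefix written via prefix lemmas
theorem pv_trow_eq (filas columnas : List String) (w i : Nat) (row : List String)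
    (hw : 1 ≤ w) (hc : w - 1 ≤ columnas.length) :
    (List.range w).map (pvValA filas columnas i) ++ row.drop w
      = pvTRow filas columnas w i row := by
  match i with
  | 0 => rw [pv_prefix_zero filas columnas w hw hc]; simp [pvTRow]
  | i + 1 => rw [pv_prefix_succ filas columnas w i hw]; simp [pvTRow]

-- length of a rewritten row 0 (row 0 has length exactly w)
theorem pv_trow0_len (filas columnas : List String) (w : Nat) (row : List String)
    (hw : 1 ≤ w) (hc : w - 1 ≤ columnas.length) (hr : row.length = w) :
    (pvTRow filas columnas w 0 row).length = w := by
  simp [pvTRow, hr]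
  omega

-- head of pvPartial
theorem pv_partial_get (filas columnas : List String) (w n : Nat) (matriz : List (List String))
    (i : Nat) (hi : i < matriz.length) :
    (pvPartial filas columnas w n matriz)[i]'(by simp [pvPartial]; omega)
      = if i < n then pvTRow filas columnas w i matriz[i] else matriz[i] := by
  simp [pvPartial, List.getElem_mapIdx]

-- (5) outer induction: A's fold computes pvPartial
theorem pv_outer (matriz : List (List String)) (filas columnas : List String)
    (w : Nat) (hw0 : (matriz.headD []).length = w) (hw : 1 ≤ w)
    (hrows : ∀ row ∈ matriz, w ≤ row.length)
    (hc : w - 1 ≤ columnas.length) :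
    ∀ n, n ≤ matriz.length →
    (List.range n).foldl (fun m i =>
        (List.range (m.getD 0 []).length).foldl (fun m' j =>
          pvSetCell m' i j (pvValA filas columnas i j)) m) matriz
      = pvPartial filas columnas w n matriz := by
  intro n
  induction n with
  | zero =>
    intro _
    apply List.ext_getElem <;> simp [pvPartial, List.getElem_mapIdx]
  | succ n ih =>
    intro hn
    have hn' : n ≤ matriz.length := by omega
    have hnm : n < matriz.length := by omega
    have h0m : 0 < matriz.length := by omega
    rw [List.range_succ, List.foldl_append, ih hn']
    simp only [List.foldl_cons, List.foldl_nil]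
    have hPlen : (pvPartial filas columnas w n matriz).length = matriz.length := by
      simp [pvPartial]
    have h0P : 0 < (pvPartial filas columnas w n matriz).length := by omega
    have hnP : n < (pvPartial filas columnas w n matriz).length := by omega
    have hrow0 : matriz[0].length = w := by
      have hh : matriz.headD [] = matriz[0] := by
        cases matriz with
        | nil => simp at h0m
        | cons a l => simp
      rw [hh] at hw0; exact hw0
    have hP0 : ((pvPartial filas columnas w n matriz).getD 0 []).length = w := by
      rw [List.getD_eq_getElem _ [] h0P, pv_partial_get filas columnas w n matriz 0 h0m]
      by_cases h0n : 0 < n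
      · rw [if_pos h0n]
        exact pv_trow0_len filas columnas w matriz[0] hw hc hrow0
      · rw [if_neg h0n]; exact hrow0
    rw [hP0]
    rw [pv_inner_lift (pvValA filas columnas n) _ _ n hnP]
    have hPn : (pvPartial filas columnas w n matriz)[n]'hnP = matriz[n] := by
      rw [pv_partial_get filas columnas w n matriz n hnm]; simp
    rw [hPn]
    have hwn : w ≤ matriz[n].length := hrows _ (List.getElem_mem hnm)
    rw [pv_row_fill (pvValA filas columnas n) w matriz[n] hwn]
    rw [pv_trow_eq filas columnas w n matriz[n] hw hc]
    apply List.ext_getElem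
    · simp [pvPartial]
    · intro k hk1 hk2
      have hkm : k < matriz.length := by
        simp only [List.length_set, hPlen] at hk1; exact hk1
      rw [List.getElem_set]
      by_cases hkn : n = k
      · subst hkn
        rw [if_pos rfl, pv_partial_get filas columnas w (n + 1) matriz n hnm]
        simp
      · rw [if_neg hkn]
        rw [pv_partial_get filas columnas w n matriz k hkm,
            pv_partial_get filas columnas w (n + 1) matriz k hkm]
        by_cases hkn' : k < n
        · rw [if_pos hkn', if_pos (by omega)]
        · rw [if_neg hkn', if_neg (by omega : ¬ k < n + 1)]

-- when row 0 is empty the outer loop does nothing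
theorem pv_outer_empty (matriz : List (List String)) (filas columnas : List String)
    (h0 : (matriz.getD 0 []).length = 0) :
    ∀ (l : List Nat),
    l.foldl (fun m i =>
        (List.range (m.getD 0 []).length).foldl (fun m' j =>
          pvSetCell m' i j (pvValA filas columnas i j)) m) matriz = matriz := by
  intro l
  induction l with
  | nil => simp
  | cons i l ih => simp only [List.foldl_cons, h0, List.range_zero, List.foldl_nil]; exact ih

-- B's zip loop on mapped rows
theorem pv_stamp (fill : List String → List String) :
    ∀ (rest : List (List String)) (filas : List String), rest.length ≤ filas.length →
    pvStampCol (rest.map fill) filas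
      = rest.mapIdx (fun k row => (fill row).set 0 (filas.getD k "")) := by
  intro rest
  induction rest with
  | nil => intro filas _; cases filas <;> simp [pvStampCol]
  | cons r rs ih =>
    intro filas hlen
    cases filas with
    | nil => simp at hlen
    | cons f fs =>
      simp only [List.map_cons, pvStampCol, List.mapIdx_cons]
      rw [ih fs (by simp at hlen; omega)]
      rfl

-- B computes the full rewrite
theorem pv_alt_eq (matriz : List (List String)) (filas columnas : List String)
    (w : Nat) (hw0 : (matriz.headD []).length = w) (hw : 1 ≤ w)
    (hf : matriz.length - 1 ≤ filas.length) :
    generarMatrizInicial_alt matriz filas columnas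
      = pvPartial filas columnas w matriz.length matriz := by
  cases matriz with
  | nil => simp at hw0; omega
  | cons row0 rest =>
    simp only [List.headD_cons] at hw0
    have hne : ¬(row0 :: rest = [] ∨ (row0 :: rest : List (List String)).headD [] = []) := by
      simp; intro h; subst h; simp at hw0; omega
    rw [generarMatrizInicial_alt, if_neg hne]
    simp only [List.headD_cons, List.map_cons, List.length_cons]
    rw [hw0]
    have hdrop : row0.drop w = [] := by
      apply List.drop_eq_nil_of_le; omega
    rw [hdrop, List.append_nil]
    obtain ⟨w', rfl⟩ : ∃ w', w = w' + 1 := ⟨w - 1, by omega⟩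
    simp only [List.replicate_succ, List.set_cons_zero]
    have hr0len : (" " :: List.replicate w' "-" : List String).length = w' + 1 := by simp
    have : (" " :: List.replicate w' "-" : List String).drop (w' + 1) = [] := by
      apply List.drop_eq_nil_of_le; simp
    rw [this, List.append_nil]
    simp only [Nat.add_sub_cancel]
    rw [pvPartial, List.mapIdx_cons]
    congr 1
    · simp [pvTRow, hdrop]
    · rw [pv_stamp _ rest filas (by simp at hf; omega)]
      apply List.ext_getElem
      · simp
      · intro k hk1 hk2
        simp only [List.getElem_mapIdx]
        have hk : k < rest.length := by simpa using hk1
        rw [if_pos (by omega : k + 1 < rest.length + 1)]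
        simp [pvTRow]

-- ===== VERDICT (by name: the statement is the Claim_ definition above) =====
theorem generarMatrizInicial_spec : Claim_equal_generarMatrizInicial := by
  intro matriz filas columnas _ hpre
  unfold Spec_generarMatrizInicial
  rcases hpre with hnil | hw0 | ⟨hrows, hc, hf⟩
  · subst hnil
    simp [generarMatrizInicial, generarMatrizInicial_alt]
  · -- row 0 empty: both sides return matriz unchanged
    cases matriz with
    | nil => simp [generarMatrizInicial, generarMatrizInicial_alt]
    | cons row0 rest =>
      simp only [List.headD_cons, List.length_eq_zero_iff] at hw0
      subst hw0
      rw [generarMatrizInicial, pv_outer_empty _ filas columnas (by simp)]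
      rw [generarMatrizInicial_alt, if_pos (by simp)]
  · set w := (matriz.headD []).length with hwdef
    by_cases hw : 1 ≤ w
    · rw [generarMatrizInicial,
        pv_outer matriz filas columnas w rfl hw hrows hc matriz.length le_rfl,
        pv_alt_eq matriz filas columnas w rfl hw hf]
    · -- w = 0
      have hw0 : w = 0 := by omega
      cases matriz with
      | nil => simp [generarMatrizInicial, generarMatrizInicial_alt]
      | cons row0 rest =>
        have : row0 = [] := by
          simp [hwdef] at hw0; exact hw0
        subst this
        rw [generarMatrizInicial, pv_outer_empty _ filas columnas (by simp)]
        rw [generarMatrizInicial_alt, if_pos (by simp)]
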